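-- pv_equiv track=rewrite | github.com/JeongGiSeong/Algorithm | 프로그래머스/3/12938. 최고의 집합/최고의 집합.py | solution
-- ===== SOURCE A (Python) =====
-- def solution(n, s):
--     answer = []
--     if n > s:
--         return [-1]
--
--     quotient, remainder = divmod(s, n)
--
--     for i in range(n-remainder):
--         answer.append(quotient)
--     for i in range(remainder):
--         answer.append(quotient+1)
--
--     return answer
-- ===== SOURCE B (Python) =====
-- def solution(n, s):
--     if n > s:
--         return [-1]
--     answer = []
--     slots, remaining = n, s
--     while True:
--         # greedily give the current slot its fair share of the remaining sum
--         q = remaining // slots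
--         answer.append(q)
--         if slots == 1:
--             return answer
--         slots -= 1
--         remaining -= q
-- ===== Notes on version B (the rewrite author's own statement) =====
-- stated objective: alternative
-- what changed: Replaced divmod(s,n) followed by two fixed replicate loops with a single greedy loop that gives each slot remaining // slots of the remaining sum.
-- outside the precondition, e.g. on solution(0, 0): A raises ZeroDivisionError, B raises ZeroDivisionError; on solution(-1, -1): A returns [], B does not finish within the time limit
import Mathlib
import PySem

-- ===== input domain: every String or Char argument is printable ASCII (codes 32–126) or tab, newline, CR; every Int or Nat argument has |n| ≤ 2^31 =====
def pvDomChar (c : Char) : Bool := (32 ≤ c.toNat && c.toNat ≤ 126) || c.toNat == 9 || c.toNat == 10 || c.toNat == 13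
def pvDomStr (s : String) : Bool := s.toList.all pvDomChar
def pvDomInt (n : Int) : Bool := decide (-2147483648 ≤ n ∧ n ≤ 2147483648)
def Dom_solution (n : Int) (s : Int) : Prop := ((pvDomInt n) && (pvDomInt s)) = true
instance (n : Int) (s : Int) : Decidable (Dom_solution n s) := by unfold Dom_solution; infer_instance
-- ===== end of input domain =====

-- B replaces A's divmod-plus-two-fixed-loops with a single greedy loop that gives
-- each slot remaining // slots of the remaining sum (objective: alternative).

-- ===== PORT A =====
def solution (n : Int) (s : Int) : List Int :=
  if n > s then [-1]
  else
    -- quotient, remainder = divmod(s, n)   (n = 0 raises ZeroDivisionError: excluded by Pre_)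
    let quotient := PySem.Int.floordiv s n
    let remainder := PySem.Int.mod s n
    let answer := (PySem.List.pyRange 0 (n - remainder) 1).foldl
      (fun acc _ => acc ++ [quotient]) []
    (PySem.List.pyRange 0 remainder 1).foldl (fun acc _ => acc ++ [quotient + 1]) answer

-- ===== PORT B =====
-- the loop 'while True: q = remaining // slots; answer.append(q); if slots == 1: return answer;
-- slots -= 1; remaining -= q' (appended elements emitted as cons). In Python the loop never
-- terminates for slots ≤ 0 (excluded by Pre_); the port stops there.
def fillAlt (slots : Int) (remaining : Int) : List Int :=
  let q := PySem.Int.floordiv remaining slots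
  if _h : slots ≤ 1 then [q]
  else q :: fillAlt (slots - 1) (remaining - q)
termination_by slots.toNat
decreasing_by omega

def solution_alt (n : Int) (s : Int) : List Int :=
  if n > s then [-1]
  else fillAlt n s

-- ===== PRECONDITION & SPEC =====
-- Pre_ excludes non-positive n with n ≤ s, outside the problem's domain (n is a set size):
-- there A raises ZeroDivisionError at n = 0, and for negative n its returned [] (two empty
-- ranges) is accidental, while B's recursion raises (ZeroDivisionError resp. RecursionError).
def Pre_solution (n : Int) (s : Int) : Prop := 1 ≤ n ∨ n > s
instance (n : Int) (s : Int) : Decidable (Pre_solution n s) := by unfold Pre_solution; infer_instance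
def pvWitness_solution : Int × Int := (3, 11)

def Spec_solution (n : Int) (s : Int) (out : List Int) : Prop := out = solution_alt n s
instance (n : Int) (s : Int) (out : List Int) : Decidable (Spec_solution n s out) := by unfold Spec_solution; infer_instance

-- ===== CLAIM (what is proved, stated in full; the proofs are below) =====
def Claim_equal_solution : Prop := ∀ (n : Int) (s : Int), Dom_solution n s → Pre_solution n s → Spec_solution n s (solution n s)

-- ===== LEMMAS AND PROOFS =====

-- invariant: with k ≥ 1 slots left and remaining = k*q + r, 0 ≤ r ≤ k, the recursion
-- yields (k - r) copies of q followed by r copies of q + 1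
theorem fillAlt_spec (k : Nat) : ∀ (q r : Int), 1 ≤ k → 0 ≤ r → r ≤ k →
    fillAlt (k : Int) ((k : Int) * q + r)
      = List.replicate (k - r.toNat) q ++ List.replicate r.toNat (q + 1) := by
  induction k with
  | zero => intro q r h1; omega
  | succ k ih =>
    intro q r _ hr0 hrk
    rw [fillAlt]
    by_cases hk0 : k = 0
    · -- slots = 1: returns [remaining // 1] = [q + r], r ∈ {0, 1}
      subst hk0
      have hr : r = 0 ∨ r = 1 := by omega
      have hdiv : PySem.Int.floordiv ((1 : Nat) * q + r) ((1 : Nat)) = q + r := by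
        rw [PySem.Int.floordiv_eq_iff_of_pos (by norm_num)]
        push_cast; constructor <;> nlinarith
      rcases hr with h | h <;> subst h <;> simp [hdiv]
    · have hk1 : ¬ ((k + 1 : Nat) : Int) ≤ 1 := by push_cast; omega
      simp only [hk1, dif_neg, not_false_iff]
      by_cases hcase : r ≤ (k : Int)
      · -- quotient is q
        have hq : PySem.Int.floordiv ((k + 1 : Nat) * q + r) ((k + 1 : Nat)) = q := by
          rw [PySem.Int.floordiv_eq_iff_of_pos (by positivity)]
          push_cast; constructor <;> nlinarith
        rw [hq]
        have harg : ((k + 1 : Nat) : Int) * q + r - q = (k : Int) * q + r := by push_cast; ring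
        rw [show ((k+1:Nat):Int) - 1 = (k:Int) by push_cast; ring, harg,
          ih q r (by omega) hr0 hcase]
        have hle : r.toNat ≤ k := by omega
        rw [show k + 1 - r.toNat = (k - r.toNat) + 1 by omega]
        simp [List.replicate_succ]
      · -- r = k + 1, quotient is q + 1
        have hr : r = (k : Int) + 1 := by omega
        subst hr
        have hq : PySem.Int.floordiv ((k + 1 : Nat) * q + ((k : Int) + 1)) ((k + 1 : Nat)) = q + 1 := by
          rw [PySem.Int.floordiv_eq_iff_of_pos (by positivity)]
          push_cast; constructor <;> nlinarith
        rw [hq]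
        have harg : ((k + 1 : Nat) : Int) * q + ((k : Int) + 1) - (q + 1) = (k : Int) * (q + 1) + 0 := by
          push_cast; ring
        rw [show ((k+1:Nat):Int) - 1 = (k:Int) by push_cast; ring, harg,
          ih (q + 1) 0 (by omega) le_rfl (by positivity)]
        have : ((k : Int) + 1).toNat = k + 1 := by omega
        simp [this, List.replicate_succ]

-- ===== VERDICT (by name: the statement is the Claim_ definition above) =====
theorem solution_spec : Claim_equal_solution := by
  intro n s _ hpre
  unfold Spec_solution solution solution_alt
  by_cases hgt : n > s
  · simp [hgt]
  · simp only [if_neg hgt]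
    have hn : 1 ≤ n := hpre.resolve_right hgt
    set q := PySem.Int.floordiv s n with hq
    set r := PySem.Int.mod s n with hr
    have hnpos : (0 : Int) < n := by omega
    have hr0 : 0 ≤ r := PySem.Int.mod_nonneg s hnpos
    have hrn : r < n := PySem.Int.mod_lt s hnpos
    have hsum : q * n + r = s := PySem.Int.floordiv_mul_add_mod s n
    have hk : ((n.toNat : Nat) : Int) = n := Int.toNat_of_nonneg (le_of_lt hnpos)
    have hb := fillAlt_spec n.toNat q r (by omega) hr0 (by omega)
    rw [hk, show n * q + r = s from by linarith [hsum]] at hb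
    rw [hb]
    simp only [PySem.List.foldl_append_singleton_eq_map, List.map_const']
    simp [PySem.List.length_pyRange_one]
    omega
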